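-- pv_equiv track=rewrite | github.com/Technologicat/unpythonic | unpythonic/numutil.py | _partition_int
-- ===== SOURCE A (Python) =====
-- def _partition_int(n, components):
--     """Implementation for `partition_int`, `partition_triangular`.
--
--     `n`: integer to partition.
--     `components`: iterable of ints; numbers that are allowed to appear
--                   in the partitioning result. Each number `m` must
--                   satisfy `1 <= m <= n`.
--     """
--     # TODO: Check contracts on input? This is an internal function for now, so no validation.
--     components = tuple(components)
--     for k in components:
--         m = n - k
--         if m == 0:
--             yield (k,)
--         else:
--             out = []
--             for item in _partition_int(m, (x for x in components if x <= m)):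
--                 out.append((k,) + item)
--             for term in out:
--                 yield term
-- ===== SOURCE B (Python) =====
-- def _partition_int(n, components):
--     """Iterative DFS with an explicit stack of (index, remaining, prefix) frames
--     instead of generator recursion; same yield order."""
--     comps = tuple(components)
--     stack = [(0, n, ())]
--     while stack:
--         i, m, prefix = stack.pop()
--         if i >= len(comps):
--             continue
--         stack.append((i + 1, m, prefix))
--         k = comps[i]
--         r = m - k
--         if r == 0:
--             yield prefix + (k,)
--         elif r > 0:
--             stack.append((0, r, prefix + (k,)))
-- ===== Notes on version B (the rewrite author's own statement) =====
-- stated objective: alternative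
-- what changed: A's recursive generator (which re-filters the component list and buffers each child's output before re-yielding) is replaced by an iterative DFS over an explicit stack of (index, remaining, prefix) frames that yields directly in the same preorder.
-- outside the precondition, e.g. on _partition_int(-2, [-1]): A returns [(-1, -1)], B returns []; on _partition_int(1, [0]): A raises RecursionError, B does not finish within the time limit
import Mathlib
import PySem

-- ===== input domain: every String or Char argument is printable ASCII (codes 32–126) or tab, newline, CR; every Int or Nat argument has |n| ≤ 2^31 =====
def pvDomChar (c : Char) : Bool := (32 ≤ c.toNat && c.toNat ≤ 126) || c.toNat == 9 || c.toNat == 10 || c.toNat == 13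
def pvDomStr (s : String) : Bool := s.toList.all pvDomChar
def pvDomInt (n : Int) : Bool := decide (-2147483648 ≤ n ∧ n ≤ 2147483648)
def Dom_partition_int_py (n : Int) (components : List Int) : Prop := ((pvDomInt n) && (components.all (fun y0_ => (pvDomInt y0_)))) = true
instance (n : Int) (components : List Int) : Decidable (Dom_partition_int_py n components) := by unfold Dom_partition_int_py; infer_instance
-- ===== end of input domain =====

set_option maxRecDepth 8192


-- B replaces A's recursive generator by an iterative DFS over an explicit stack of
-- (index, remaining, prefix) frames (objective: alternative; same output order).

-- ===== PORT A =====
-- recursion of A, made total by a fuel argument (pure totality guard; on Pre_ the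
-- fuel below is never exhausted, as proved in the lemmas)
def pvPartA : Nat → Int → List Int → List (List Int)
  | 0, _, _ => []
  | fuel+1, n, comps =>
    comps.foldl (fun acc k =>
      if n - k = 0 then acc ++ [[k]]
      else acc ++ (pvPartA fuel (n - k) (comps.filter (fun x => decide (x ≤ n - k)))).map
                    (fun item => k :: item)) []

def partition_int_py (n : Int) (components : List Int) : List (List Int) :=
  pvPartA (n.natAbs + 2 * (components.map Int.natAbs).sum + components.length + 2) n components

-- ===== PORT B =====
-- step-count bound used as loop fuel for the while-loop (totality guard only)
def pvPosK (c : Nat) : Nat → Nat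
  | 0 => c + 1
  | μ+1 => (c + 1) + c * pvPosK c μ

-- one frame = (index into comps, remaining value, accumulated pre); the Python
-- stack with `pop` from the right is the head of the list here
def pvStepB : Nat → List (Nat × Int × List Int) → List Int → List (List Int)
  | 0, _, _ => []
  | _+1, [], _ => []
  | fuel+1, (i, m, pre) :: rest, comps =>
    if i < comps.length then
      let k := comps.getD i 0
      let r := m - k
      if r = 0 then (pre ++ [k]) :: pvStepB fuel ((i+1, m, pre) :: rest) comps
      else if 0 < r then pvStepB fuel ((0, r, pre ++ [k]) :: (i+1, m, pre) :: rest) comps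
      else pvStepB fuel ((i+1, m, pre) :: rest) comps
    else pvStepB fuel rest comps

def partition_int_py_alt (n : Int) (components : List Int) : List (List Int) :=
  pvStepB ((components.length + 1) + components.length * pvPosK components.length n.toNat)
    [(0, n, [])] components

-- ===== PRECONDITION & SPEC =====
-- Pre_ admits components that are all positive (the function's documented contract,
-- "1 <= m <= n") and, in addition, any components for which every branch resolves at
-- depth one (each k either yields n immediately or leaves a remainder below every
-- component).  Outside Pre_ A's recursion mostly fails to terminate (RecursionError,
-- e.g. any 0 component with n ≠ 0); on the remaining corners A reaches sums through
-- negative intermediate remainders, a corner outside the documented domain where A's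
-- and B's values are both defensible and differ (e.g. (-2, [-1])).
def Pre_partition_int_py (n : Int) (components : List Int) : Prop :=
  (∀ x ∈ components, 1 ≤ x) ∨
    (∀ k ∈ components, n - k = 0 ∨ (n - k < 0 ∧ ∀ x ∈ components, n - k < x))
instance (n : Int) (components : List Int) : Decidable (Pre_partition_int_py n components) := by
  unfold Pre_partition_int_py; infer_instance

def pvWitness_partition_int_py : Int × List Int := (4, [1, 2])

def Spec_partition_int_py (n : Int) (components : List Int) (out : List (List Int)) : Prop :=
  out = partition_int_py_alt n components
instance (n : Int) (components : List Int) (out : List (List Int)) :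
    Decidable (Spec_partition_int_py n components out) := by
  unfold Spec_partition_int_py; infer_instance

-- ===== CLAIM (what is proved, stated in full; the proofs are below) =====
def Claim_equal_partition_int_py : Prop :=
  ∀ (n : Int) (components : List Int), Dom_partition_int_py n components →
    Pre_partition_int_py n components →
    Spec_partition_int_py n components (partition_int_py n components)

-- ===== LEMMAS AND PROOFS =====

theorem pvPartA_nil (fuel : Nat) (m : Int) : pvPartA fuel m [] = [] := by
  cases fuel <;> simp [pvPartA]

theorem pvFilter_neg_nil (l : List Int) (m : Int) (hpos : ∀ x ∈ l, 1 ≤ x) (hm : m < 0) :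
    l.filter (fun x => decide (x ≤ m)) = [] := by
  rw [List.filter_eq_nil_iff]
  intro x hx
  have := hpos x hx
  simp only [decide_eq_true_eq]
  omega

-- A's loop body as a flatMap
theorem pvPartA_succ (fuel : Nat) (m : Int) (l : List Int) :
    pvPartA (fuel + 1) m l =
      l.flatMap (fun k =>
        if m - k = 0 then [[k]]
        else (pvPartA fuel (m - k) (l.filter (fun x => decide (x ≤ m - k)))).map
               (fun item => k :: item)) := by
  show l.foldl _ [] = _
  have hbody : (fun (acc : List (List Int)) (k : Int) =>
      if m - k = 0 then acc ++ [[k]]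
      else acc ++ (pvPartA fuel (m - k) (l.filter (fun x => decide (x ≤ m - k)))).map
             (fun item => k :: item))
      = fun acc k => acc ++
          (if m - k = 0 then [[k]]
           else (pvPartA fuel (m - k) (l.filter (fun x => decide (x ≤ m - k)))).map
                  (fun item => k :: item)) := by
    funext acc k; split <;> rfl
  rw [hbody, PySem.List.foldl_append_eq_flatMap, List.nil_append]

theorem pvFlatMap_filter {α β : Type} (p : α → Bool) (G : α → List β) :
    ∀ (l : List α), (∀ k ∈ l, p k = false → G k = []) →
    (l.filter p).flatMap G = l.flatMap G := by
  intro l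
  induction l with
  | nil => intro _; rfl
  | cons a t ih =>
    intro h
    have ht : ∀ k ∈ t, p k = false → G k = [] :=
      fun k hk => h k (List.mem_cons_of_mem a hk)
    by_cases ha : p a = true
    · simp [ha, ih ht]
    · have ha' : p a = false := by simpa using ha
      simp [ha', ih ht, h a (List.mem_cons_self ..) ha']

theorem pvPartA_filter (fuel : Nat) (m : Int) (l : List Int) (hpos : ∀ x ∈ l, 1 ≤ x) :
    pvPartA fuel m (l.filter (fun x => decide (x ≤ m))) = pvPartA fuel m l := by
  cases fuel with
  | zero => rfl
  | succ fuel =>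
    rw [pvPartA_succ, pvPartA_succ]
    -- align the recursive list arguments on the filtered side
    have hG : ∀ k ∈ l.filter (fun x => decide (x ≤ m)),
        (if m - k = 0 then [[k]]
         else (pvPartA fuel (m - k)
                ((l.filter (fun x => decide (x ≤ m))).filter (fun x => decide (x ≤ m - k)))).map
               (fun item => k :: item))
        = (if m - k = 0 then [[k]]
           else (pvPartA fuel (m - k) (l.filter (fun x => decide (x ≤ m - k)))).map
                 (fun item => k :: item)) := by
      intro k hk
      rw [List.mem_filter] at hk
      obtain ⟨hkl, hkm⟩ := hk
      have hk1 : 1 ≤ k := hpos k hkl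
      split
      · rfl
      · have : (l.filter (fun x => decide (x ≤ m))).filter (fun x => decide (x ≤ m - k))
            = l.filter (fun x => decide (x ≤ m - k)) := by
          rw [List.filter_filter]
          apply List.filter_congr
          intro x hx
          by_cases hxr : x ≤ m - k
          · have hxm : x ≤ m := by omega
            simp [hxr, hxm]
          · simp [hxr]
        rw [this]
    rw [List.flatMap_congr hG]
    -- drop the outer filter: elements with k > m contribute []
    apply pvFlatMap_filter
    intro k hk hfalse
    have hk1 : 1 ≤ k := hpos k hk
    have hkm : ¬ (k ≤ m) := by simpa using hfalse
    have hneg : m - k < 0 := by omega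
    rw [if_neg (by omega), pvFilter_neg_nil l (m - k) hpos hneg, pvPartA_nil]
    rfl

-- any sufficient fuel computes the same value (positive components)
theorem pvPartA_fuel (μ : Nat) : ∀ (m : Int) (l : List Int) (f₁ f₂ : Nat),
    (∀ x ∈ l, 1 ≤ x) → m.toNat ≤ μ → m.toNat < f₁ → m.toNat < f₂ →
    pvPartA f₁ m l = pvPartA f₂ m l := by
  induction μ with
  | zero =>
    intro m l f₁ f₂ hpos hμ h1 h2
    obtain ⟨g₁, rfl⟩ : ∃ g, f₁ = g + 1 := ⟨f₁ - 1, by omega⟩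
    obtain ⟨g₂, rfl⟩ : ∃ g, f₂ = g + 1 := ⟨f₂ - 1, by omega⟩
    rw [pvPartA_succ, pvPartA_succ]
    apply List.flatMap_congr
    intro k hk
    have hk1 : 1 ≤ k := hpos k hk
    have hm0 : m ≤ 0 := by omega
    have hneg : m - k < 0 := by omega
    rw [if_neg (by omega), if_neg (by omega),
      pvFilter_neg_nil l (m - k) hpos hneg, pvPartA_nil, pvPartA_nil]
  | succ μ ih =>
    intro m l f₁ f₂ hpos hμ h1 h2
    obtain ⟨g₁, rfl⟩ : ∃ g, f₁ = g + 1 := ⟨f₁ - 1, by omega⟩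
    obtain ⟨g₂, rfl⟩ : ∃ g, f₂ = g + 1 := ⟨f₂ - 1, by omega⟩
    rw [pvPartA_succ, pvPartA_succ]
    apply List.flatMap_congr
    intro k hk
    have hk1 : 1 ≤ k := hpos k hk
    by_cases h0 : m - k = 0
    · rw [if_pos h0, if_pos h0]
    rw [if_neg h0, if_neg h0]
    by_cases hneg : m - k < 0
    · rw [pvFilter_neg_nil l (m - k) hpos hneg, pvPartA_nil, pvPartA_nil]
    · have hr : 0 < m - k := by omega
      have hposf : ∀ x ∈ l.filter (fun x => decide (x ≤ m - k)), 1 ≤ x := by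
        intro x hx; exact hpos x (List.mem_of_mem_filter hx)
      have hm : 0 < m := by omega
      have hrn : (m - k).toNat ≤ μ := by omega
      rw [ih (m - k) _ g₁ g₂ hposf hrn (by omega) (by omega)]

-- A, normalized: sufficient fuel, no filtering, recursion at canonical fuel
theorem pvPartA_flat (fuel : Nat) (m : Int) (l : List Int)
    (hpos : ∀ x ∈ l, 1 ≤ x) (hf : m.toNat < fuel) :
    pvPartA fuel m l =
      l.flatMap (fun k =>
        if m - k = 0 then [[k]]
        else if 0 < m - k then
          (pvPartA ((m - k).toNat + 1) (m - k) l).map (fun item => k :: item)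
        else []) := by
  obtain ⟨g, rfl⟩ : ∃ g, fuel = g + 1 := ⟨fuel - 1, by omega⟩
  rw [pvPartA_succ]
  apply List.flatMap_congr
  intro k hk
  have hk1 : 1 ≤ k := hpos k hk
  by_cases h0 : m - k = 0
  · rw [if_pos h0, if_pos h0]
  rw [if_neg h0, if_neg h0]
  by_cases hneg : m - k < 0
  · rw [if_neg (by omega), pvFilter_neg_nil l (m - k) hpos hneg, pvPartA_nil]
    simp
  · have hr : 0 < m - k := by omega
    rw [if_pos hr, pvPartA_filter g (m - k) l hpos]
    have hm : 0 < m := by omega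
    rw [pvPartA_fuel (m - k).toNat (m - k) l g ((m - k).toNat + 1) hpos le_rfl (by omega) (by omega)]

-- denotation of one stack frame: the outputs B still produces for it
def pvDen (comps : List Int) (fr : Nat × Int × List Int) : List (List Int) :=
  (comps.drop fr.1).flatMap (fun k =>
    if fr.2.1 - k = 0 then [fr.2.2 ++ [k]]
    else if 0 < fr.2.1 - k then
      (pvPartA ((fr.2.1 - k).toNat + 1) (fr.2.1 - k) comps).map (fun t => fr.2.2 ++ k :: t)
    else [])

theorem pvDen_zero (comps : List Int) (r : Int) (q : List Int) (hpos : ∀ x ∈ comps, 1 ≤ x) :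
    pvDen comps (0, r, q) = (pvPartA (r.toNat + 1) r comps).map (fun t => q ++ t) := by
  rw [pvPartA_flat (r.toNat + 1) r comps hpos (by omega)]
  unfold pvDen
  simp only [List.drop_zero, List.map_flatMap]
  apply List.flatMap_congr
  intro k hk
  by_cases h0 : r - k = 0
  · simp [h0]
  · rw [if_neg h0, if_neg h0, apply_ite (List.map (fun t => q ++ t))]
    by_cases hr : 0 < r - k
    · rw [if_pos hr, if_pos hr, List.map_map]
      rfl
    · rw [if_neg hr, if_neg hr]
      rfl

-- cost bookkeeping for B's loop
def pvFcost (c i : Nat) (m : Int) : Nat := (c - i + 1) + (c - i) * pvPosK c (m.toNat - 1)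

def pvCost (c : Nat) (st : List (Nat × Int × List Int)) : Nat :=
  (st.map (fun f => pvFcost c f.1 f.2.1)).sum

theorem pvPosK_le_succ (c μ : Nat) : pvPosK c μ ≤ pvPosK c (μ + 1) := by
  induction μ with
  | zero =>
    calc pvPosK c 0 = c + 1 := rfl
      _ ≤ (c + 1) + c * pvPosK c 0 := Nat.le_add_right _ _
      _ = pvPosK c 1 := rfl
  | succ μ ih =>
    calc pvPosK c (μ + 1) = (c + 1) + c * pvPosK c μ := rfl
      _ ≤ (c + 1) + c * pvPosK c (μ + 1) := Nat.add_le_add_left (Nat.mul_le_mul_left c ih) _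
      _ = pvPosK c (μ + 1 + 1) := rfl

theorem pvPosK_mono (c : Nat) {a b : Nat} (h : a ≤ b) : pvPosK c a ≤ pvPosK c b := by
  induction b with
  | zero => simp_all
  | succ b ih =>
    rcases Nat.lt_or_ge a (b + 1) with h' | h'
    · exact le_trans (ih (by omega)) (pvPosK_le_succ c b)
    · have : a = b + 1 := by omega
      subst this; rfl

theorem pvFcost_pos (c i : Nat) (m : Int) : 0 < pvFcost c i m := by
  unfold pvFcost
  exact Nat.lt_of_lt_of_le (Nat.succ_pos _) (Nat.le_add_right _ _)

-- stepping a frame to its next index frees one fuel unit plus one full child budget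
theorem pvFcost_step (c i : Nat) (m : Int) (hi : i < c) :
    pvFcost c (i + 1) m + pvPosK c (m.toNat - 1) + 1 ≤ pvFcost c i m := by
  unfold pvFcost
  have h1 : c - i = (c - (i + 1)) + 1 := by omega
  rw [h1, Nat.succ_mul]
  linarith

theorem pvFcost_child (c : Nat) (r : Int) (hr : 0 < r) : pvFcost c 0 r = pvPosK c r.toNat := by
  obtain ⟨ρ, hρ⟩ : ∃ ρ, r.toNat = ρ + 1 := ⟨r.toNat - 1, by omega⟩
  unfold pvFcost
  rw [hρ]
  simp only [Nat.sub_zero, Nat.add_sub_cancel, pvPosK]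

-- B's loop computes the concatenated denotations of its stack, given enough fuel
theorem pvStepB_den (comps : List Int) (hpos : ∀ x ∈ comps, 1 ≤ x) :
    ∀ (fuel : Nat) (st : List (Nat × Int × List Int)),
    pvCost comps.length st ≤ fuel →
    pvStepB fuel st comps = st.flatMap (pvDen comps) := by
  intro fuel
  induction fuel with
  | zero =>
    intro st hc
    cases st with
    | nil => rfl
    | cons fr rest =>
      exfalso
      have h1 := pvFcost_pos comps.length fr.1 fr.2.1
      simp only [pvCost, List.map_cons, List.sum_cons] at hc
      omega
  | succ fuel ih =>
    intro st hc
    cases st with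
    | nil => rfl
    | cons fr rest =>
      obtain ⟨i, m, p⟩ := fr
      simp only [pvCost, List.map_cons, List.sum_cons] at hc
      by_cases hi : i < comps.length
      case neg =>
        have h1 := pvFcost_pos comps.length i m
        rw [pvStepB, if_neg hi, ih rest (by simp only [pvCost]; omega)]
        have hdrop : comps.drop i = [] := List.drop_eq_nil_of_le (by omega)
        rw [List.flatMap_cons]
        unfold pvDen
        rw [hdrop, List.flatMap_nil, List.nil_append]
      case pos =>
      have hget : comps.getD i 0 = comps[i]'hi := List.getD_eq_getElem comps 0 hi
      have hk1 : 1 ≤ comps[i]'hi := hpos _ (List.getElem_mem hi)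
      have hdrop : comps.drop i = comps[i]'hi :: comps.drop (i + 1) :=
        (List.getElem_cons_drop hi).symm
      have hstep := pvFcost_step comps.length i m hi
      have hsib : pvCost comps.length ((i + 1, m, p) :: rest) ≤ fuel := by
        simp only [pvCost, List.map_cons, List.sum_cons]
        omega
      rw [pvStepB, if_pos hi]
      simp only [hget]
      by_cases h0 : m - comps[i]'hi = 0
      · rw [if_pos h0, ih ((i + 1, m, p) :: rest) hsib]
        simp only [pvDen, List.flatMap_cons, hdrop, h0, if_true, eq_self_iff_true,
          List.cons_append, List.nil_append]
      rw [if_neg h0]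
      by_cases hr : 0 < m - comps[i]'hi
      · rw [if_pos hr]
        have hm : 0 < m := by omega
        have hrn : (m - comps[i]'hi).toNat ≤ m.toNat - 1 := by omega
        have hchild : pvFcost comps.length 0 (m - comps[i]'hi) ≤ pvPosK comps.length (m.toNat - 1) := by
          rw [pvFcost_child comps.length _ hr]
          exact pvPosK_mono comps.length hrn
        have hcost : pvCost comps.length
            ((0, m - comps[i]'hi, p ++ [comps[i]'hi]) :: (i + 1, m, p) :: rest) ≤ fuel := by
          simp only [pvCost, List.map_cons, List.sum_cons]
          omega
        rw [ih _ hcost]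
        simp only [List.flatMap_cons, pvDen_zero comps _ _ hpos]
        simp only [pvDen, hdrop, List.flatMap_cons, h0, hr, if_true, if_false, ite_true,
          ite_false, List.cons_append, List.nil_append]
        rw [List.append_assoc]
        congr 1
        · apply List.map_congr_left
          intro t ht
          simp
      · rw [if_neg hr, ih ((i + 1, m, p) :: rest) hsib]
        simp only [pvDen, List.flatMap_cons, hdrop, h0, hr, if_false, ite_false,
          List.nil_append]

-- B's loop on a stack whose frame has no viable child: a single left-to-right sweep
theorem pvStepB_sweep (comps : List Int) (m : Int) (p : List Int)
    (hneg : ∀ k ∈ comps, m - k ≤ 0) :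
    ∀ (d i fuel : Nat), i + d = comps.length → d < fuel →
    pvStepB fuel [(i, m, p)] comps =
      (comps.drop i).flatMap (fun k => if m - k = 0 then [p ++ [k]] else []) := by
  intro d
  induction d with
  | zero =>
    intro i fuel hd hf
    obtain ⟨g, rfl⟩ : ∃ g, fuel = g + 1 := ⟨fuel - 1, by omega⟩
    have hi : ¬ i < comps.length := by omega
    rw [pvStepB, if_neg hi]
    have hdrop : comps.drop i = [] := List.drop_eq_nil_of_le (by omega)
    rw [hdrop, List.flatMap_nil]
    cases g <;> rfl
  | succ d ih =>
    intro i fuel hd hf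
    obtain ⟨g, rfl⟩ : ∃ g, fuel = g + 1 := ⟨fuel - 1, by omega⟩
    have hi : i < comps.length := by omega
    have hget : comps.getD i 0 = comps[i]'hi := List.getD_eq_getElem comps 0 hi
    have hdrop : comps.drop i = comps[i]'hi :: comps.drop (i + 1) :=
      (List.getElem_cons_drop hi).symm
    have hk := hneg _ (List.getElem_mem hi)
    rw [pvStepB, if_pos hi]
    simp only [hget]
    by_cases h0 : m - comps[i]'hi = 0
    · rw [if_pos h0, ih (i + 1) g (by omega) (by omega)]
      rw [hdrop, List.flatMap_cons, if_pos h0, List.singleton_append]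
    · rw [if_neg h0, if_neg (by omega), ih (i + 1) g (by omega) (by omega)]
      rw [hdrop, List.flatMap_cons, if_neg h0, List.nil_append]

-- ===== VERDICT (by name: the statement is the Claim_ definition above) =====
theorem partition_int_py_spec : Claim_equal_partition_int_py := by
  intro n comps _hdom hpre
  unfold Spec_partition_int_py partition_int_py partition_int_py_alt
  rcases hpre with hpos | hbr
  · -- all components positive: both sides compute the full composition tree
    have hmono : pvPosK comps.length (n.toNat - 1) ≤ pvPosK comps.length n.toNat :=
      pvPosK_mono comps.length (by omega)
    have hfuel : pvCost comps.length [(0, n, [])] ≤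
        (comps.length + 1) + comps.length * pvPosK comps.length n.toNat := by
      simp only [pvCost, List.map_cons, List.map_nil, List.sum_cons, List.sum_nil, pvFcost,
        Nat.sub_zero, Nat.add_zero]
      have h2 := Nat.mul_le_mul_left comps.length hmono
      omega
    rw [pvStepB_den comps hpos _ _ hfuel]
    simp only [List.flatMap_cons, List.flatMap_nil, List.append_nil]
    rw [pvDen_zero comps n [] hpos]
    rw [pvPartA_fuel n.toNat n comps _ (n.toNat + 1) hpos le_rfl (by omega) (by omega)]
    simp
  · -- all components negative and every branch resolves at depth one
    have hneg : ∀ k ∈ comps, n - k ≤ 0 := by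
      intro k hk
      rcases hbr k hk with h | ⟨h, _⟩ <;> omega
    rw [pvStepB_sweep comps n [] hneg comps.length 0 _ (by omega)
      (by
        have := Nat.le_add_right comps.length
          (comps.length * pvPosK comps.length n.toNat)
        omega),
      List.drop_zero]
    obtain ⟨g, hg⟩ : ∃ g, n.natAbs + 2 * (comps.map Int.natAbs).sum + comps.length + 2 = g + 1 :=
      ⟨n.natAbs + 2 * (comps.map Int.natAbs).sum + comps.length + 1, by omega⟩
    rw [hg, pvPartA_succ]
    apply List.flatMap_congr
    intro k hk
    by_cases h0 : n - k = 0
    · rw [if_pos h0, if_pos h0, List.nil_append]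
    · rw [if_neg h0, if_neg h0]
      rcases hbr k hk with h | ⟨hlt, hall⟩
      · exact absurd h h0
      · have hfil : comps.filter (fun x => decide (x ≤ n - k)) = [] := by
          rw [List.filter_eq_nil_iff]
          intro x hx
          have := hall x hx
          simp only [decide_eq_true_eq]
          omega
        rw [hfil, pvPartA_nil]
        rfl
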